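-- pv_equiv track=rewrite | github.com/KateGordon21/ccsc | PackagePriorities-Cole.py | return_highest_sender_priority
-- ===== SOURCE A (Python) =====
-- def return_highest_sender_priority(packages):
--     highest_priority = 0
--     for package in packages:
--         highest_priority = max(highest_priority, package[3])
--
--     highest_priority_packages = []
--     for package in packages:
--         if package[3] == highest_priority:
--             highest_priority_packages.append(package)
--
--     return highest_priority_packages
-- ===== SOURCE B (Python) =====
-- def return_highest_sender_priority(packages):
--     best = 0
--     result = []
--     for package in packages:
--         if package[3] > best:
--             best = package[3]
--             result = [package]
--         elif package[3] == best:
--             result.append(package)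
--     return result
-- ===== Notes on version B (the rewrite author's own statement) =====
-- stated objective: alternative
-- what changed: Replaced the two independent scans (one fold to find the max priority, one filter-pass to collect it) by a single pass maintaining a running best priority and the list of packages attaining it.
import Mathlib
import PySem

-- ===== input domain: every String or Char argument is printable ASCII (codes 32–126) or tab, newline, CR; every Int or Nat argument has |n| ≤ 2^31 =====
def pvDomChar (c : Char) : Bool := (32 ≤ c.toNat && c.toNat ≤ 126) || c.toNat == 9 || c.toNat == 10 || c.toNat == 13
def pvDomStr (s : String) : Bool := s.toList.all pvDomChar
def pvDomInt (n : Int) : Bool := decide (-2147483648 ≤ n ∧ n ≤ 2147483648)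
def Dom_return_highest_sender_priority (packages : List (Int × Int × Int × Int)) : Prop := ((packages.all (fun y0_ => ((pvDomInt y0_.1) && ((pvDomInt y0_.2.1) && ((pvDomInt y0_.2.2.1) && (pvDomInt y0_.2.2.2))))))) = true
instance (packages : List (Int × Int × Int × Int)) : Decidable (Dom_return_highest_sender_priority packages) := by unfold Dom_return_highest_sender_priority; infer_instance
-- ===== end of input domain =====

-- B replaces A's two scans (max, then filter) by one pass keeping the running best
-- priority together with the list of packages attaining it (same O(n), one traversal).

-- ===== PORT A =====
-- two passes: fold computing the max (seeded at 0), then append-if fold collecting ties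
def return_highest_sender_priority (packages : List (Int × Int × Int × Int)) : List (Int × Int × Int × Int) :=
  let highest_priority : Int := packages.foldl (fun h p => max h p.2.2.2) 0
  packages.foldl (fun acc p => if p.2.2.2 = highest_priority then acc ++ [p] else acc) []

-- ===== PORT B =====
-- single pass carrying (best, result)
def return_highest_sender_priority_alt (packages : List (Int × Int × Int × Int)) : List (Int × Int × Int × Int) :=
  (packages.foldl
    (fun (s : Int × List (Int × Int × Int × Int)) p =>
      if p.2.2.2 > s.1 then (p.2.2.2, [p])
      else if p.2.2.2 = s.1 then (s.1, s.2 ++ [p])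
      else s)
    ((0 : Int), [])).2

-- ===== PRECONDITION & SPEC =====
def Spec_return_highest_sender_priority (packages : List (Int × Int × Int × Int)) (out : List (Int × Int × Int × Int)) : Prop := out = return_highest_sender_priority_alt packages
instance (packages : List (Int × Int × Int × Int)) (out : List (Int × Int × Int × Int)) : Decidable (Spec_return_highest_sender_priority packages out) := by unfold Spec_return_highest_sender_priority; infer_instance

-- ===== CLAIM (what is proved, stated in full; the proofs are below) =====
def Claim_equal_return_highest_sender_priority : Prop := ∀ (packages : List (Int × Int × Int × Int)), Dom_return_highest_sender_priority packages → Spec_return_highest_sender_priority packages (return_highest_sender_priority packages)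

-- ===== LEMMAS AND PROOFS =====

-- the max-fold never drops below its seed
theorem pv_maxfold_ge (l : List (Int × Int × Int × Int)) (b : Int) :
    b ≤ l.foldl (fun h p => max h p.2.2.2) b := by
  induction l generalizing b with
  | nil => simp
  | cons p l ih =>
      simp only [List.foldl_cons]
      exact le_trans (le_max_left _ _) (ih (max b p.2.2.2))

-- invariant of B's one-pass fold: it computes the running max, and its list component
-- is the old list (kept iff the max did not change) followed by the ties of the rest
theorem pv_alt_fold (l : List (Int × Int × Int × Int)) (b : Int) (acc : List (Int × Int × Int × Int)) :
    l.foldl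
      (fun (s : Int × List (Int × Int × Int × Int)) p =>
        if p.2.2.2 > s.1 then (p.2.2.2, [p])
        else if p.2.2.2 = s.1 then (s.1, s.2 ++ [p])
        else s) (b, acc)
    = (l.foldl (fun h p => max h p.2.2.2) b,
       (if l.foldl (fun h p => max h p.2.2.2) b = b then acc else [])
         ++ l.filter (fun p => p.2.2.2 = l.foldl (fun h p => max h p.2.2.2) b)) := by
  induction l generalizing b acc with
  | nil => simp
  | cons p l ih =>
      have hM : ∀ c : Int, c ≤ l.foldl (fun h q => max h q.2.2.2) c := fun c => pv_maxfold_ge l c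
      simp only [List.foldl_cons, List.filter_cons]
      by_cases h1 : p.2.2.2 > b
      · have hmax : max b p.2.2.2 = p.2.2.2 := max_eq_right (le_of_lt h1)
        rw [if_pos h1, ih]
        simp only [hmax]
        have hMb : l.foldl (fun h q => max h q.2.2.2) p.2.2.2 ≠ b := by
          have := hM p.2.2.2; omega
        rw [if_neg hMb]
        by_cases h2 : l.foldl (fun h q => max h q.2.2.2) p.2.2.2 = p.2.2.2
        · simp [h2]
        · have h2' : ¬ p.2.2.2 = l.foldl (fun h q => max h q.2.2.2) p.2.2.2 :=
            fun e => h2 (Eq.symm e)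
          simp [h2, h2']
      · rw [if_neg h1]
        have hmax : max b p.2.2.2 = b := max_eq_left (by omega)
        by_cases h2 : p.2.2.2 = b
        · rw [if_pos h2, ih]
          simp only [hmax]
          by_cases h3 : l.foldl (fun h q => max h q.2.2.2) b = b
          · simp [h3, h2]
          · have : p.2.2.2 ≠ l.foldl (fun h q => max h q.2.2.2) b := by rw [h2]; exact fun e => h3 e.symm
            simp [h3, this]
        · rw [if_neg h2, ih]
          simp only [hmax]
          have : p.2.2.2 ≠ l.foldl (fun h q => max h q.2.2.2) b := by
            have := hM b; intro e; omega
          simp [this]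

-- ===== VERDICT (by name: the statement is the Claim_ definition above) =====
theorem return_highest_sender_priority_spec : Claim_equal_return_highest_sender_priority := by
  intro packages _
  unfold Spec_return_highest_sender_priority
  unfold return_highest_sender_priority return_highest_sender_priority_alt
  rw [pv_alt_fold]
  simp only []
  rw [PySem.List.foldl_append_ite_eq_filter]
  simp
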